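-- pv_equiv track=rewrite | github.com/jk-jung/problem-solving | codewars/6kyu/6_Word Mesh.py | word_mesh
-- ===== SOURCE A (Python) =====
-- def word_mesh(w):
--     r = ''
--     for i in range(0, len(w) - 1):
--         ok = False
--         for j in range(0, len(w[i])):
--             x = w[i][j:]
--             if w[i + 1].startswith(x):
--                 r += x
--                 ok = True
--                 break
--         if not ok: return 'failed to mesh'
--     return r
-- ===== SOURCE B (Python) =====
-- def word_mesh(w):
--     out = []
--     for s, t in zip(w, w[1:]):
--         u = t + '\x00' + s
--         pi = [0] * len(u)
--         k = 0
--         for i in range(1, len(u)):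
--             while k > 0 and u[i] != u[k]:
--                 k = pi[k - 1]
--             if u[i] == u[k]:
--                 k += 1
--             pi[i] = k
--         if k == 0:
--             return 'failed to mesh'
--         out.append(t[:k])
--     return ''.join(out)
-- ===== Notes on version B (the rewrite author's own statement) =====
-- stated objective: alternative
-- what changed: A scans, for each adjacent pair, every suffix of w[i] from the longest and tests it with startswith; B instead computes the KMP prefix-function of t+NUL+s once per pair, whose final value is the longest suffix-prefix overlap, zipping adjacent pairs and joining the collected prefixes.
import Mathlib
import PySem

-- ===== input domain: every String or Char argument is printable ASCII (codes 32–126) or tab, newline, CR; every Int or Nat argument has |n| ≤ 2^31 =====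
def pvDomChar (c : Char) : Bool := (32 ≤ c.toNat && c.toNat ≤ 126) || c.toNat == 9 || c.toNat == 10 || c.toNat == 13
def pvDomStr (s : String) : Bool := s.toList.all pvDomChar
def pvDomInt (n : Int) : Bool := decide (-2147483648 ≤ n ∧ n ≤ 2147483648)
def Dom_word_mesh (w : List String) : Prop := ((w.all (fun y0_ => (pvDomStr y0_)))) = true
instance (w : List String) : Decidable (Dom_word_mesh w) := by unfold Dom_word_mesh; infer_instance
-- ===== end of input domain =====

-- B replaces A's per-pair suffix scan by a different algorithm: the KMP prefix function of
-- t+'\x00'+s; equivalence of return values is proved for all inputs in Dom (A is total).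

-- ===== PORT A =====
-- inner loop: for j in range(0, len(w[i])): x = w[i][j:]; if w[i+1].startswith(x): break
def wmAInner (s t : List Char) : List Int → Option (List Char)
  | [] => none
  | j :: js =>
      let x := PySem.Chars.slice s (some j) none
      if PySem.Chars.startswith t x then some x else wmAInner s t js

-- outer loop over i in range(0, len(w)-1); none = early return 'failed to mesh'
def wmALoop (ws : List (List Char)) (r : List Char) : List Int → Option (List Char)
  | [] => some r
  | i :: is =>
      let s := PySem.List.pyGetD ws i []
      let t := PySem.List.pyGetD ws (i + 1) []
      match wmAInner s t (PySem.List.pyRange 0 (s.length : Int) 1) with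
      | some x => wmALoop ws (r ++ x) is
      | none => none

def word_mesh (w : List String) : String :=
  match wmALoop (w.map String.toList) [] (PySem.List.pyRange 0 ((w.length : Int) - 1) 1) with
  | some r => String.ofList r
  | none => "failed to mesh"

-- ===== PORT B =====
-- u[i] (always in range in Source B; the default is never read)
def wmGet (u : List Char) (i : Nat) : Char := u.getD i '\x00'

-- while k > 0 and u[i] != u[k]: k = pi[k-1]   (c = u[i]; fuel makes the loop total, k strictly decreases)
def wmFall (u : List Char) (pi : List Nat) (c : Char) : Nat → Nat → Nat
  | 0, k => k
  | fuel + 1, k => if 0 < k ∧ ¬ c = wmGet u k then wmFall u pi c fuel (pi.getD (k - 1) 0) else k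

-- one iteration of Source B's for-i loop: fall back, extend on match, store pi[i] = k
def wmStep (u : List Char) (st : List Nat × Nat) (i : Nat) : List Nat × Nat :=
  let c := wmGet u i
  let k1 := wmFall u st.1 c st.2 st.2
  let k2 := if c = wmGet u k1 then k1 + 1 else k1
  (st.1.set i k2, k2)

-- pi = [0]*len(u); k = 0; for i in range(1, len(u)): …; final k
def wmPi (u : List Char) : Nat :=
  ((List.range' 1 (u.length - 1)).foldl (wmStep u) (List.replicate u.length 0, 0)).2

-- u = t + '\x00' + s
def wmPair (s t : List Char) : Nat := wmPi (t ++ '\x00' :: s)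

-- the for-pair loop collecting parts; none = early return 'failed to mesh'
def wmBGo : List (List Char × List Char) → Option (List (List Char))
  | [] => some []
  | (s, t) :: ps =>
      let k := wmPair s t
      if k = 0 then none else (wmBGo ps).map (t.take k :: ·)

def word_mesh_alt (w : List String) : String :=
  let ws := w.map String.toList
  match wmBGo (ws.zip ws.tail) with
  | some parts => String.ofList parts.flatten
  | none => "failed to mesh"

-- ===== PRECONDITION & SPEC =====
def Spec_word_mesh (w : List String) (out : String) : Prop := out = word_mesh_alt w
instance (w : List String) (out : String) : Decidable (Spec_word_mesh w out) := by unfold Spec_word_mesh; infer_instance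

-- ===== CLAIM (what is proved, stated in full; the proofs are below) =====
def Claim_equal_word_mesh : Prop := ∀ (w : List String), Dom_word_mesh w → Spec_word_mesh w (word_mesh w)

-- ===== LEMMAS AND PROOFS =====

-- proof-layer reference function: the largest overlap length, scanned downward
def wmBOver (s t : List Char) : Nat → Nat
  | 0 => 0
  | k + 1 => if s.drop (s.length - (k + 1)) = t.take (k + 1) then k + 1 else wmBOver s t k

-- k is a (proper) border of v
abbrev Bord (v : List Char) (k : Nat) : Prop := k < v.length ∧ v.take k = v.drop (v.length - k)

-- length of the longest proper border of v
def maxBord (v : List Char) : Nat := Nat.findGreatest (Bord v) (v.length - 1)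

-- ============ A-side: the inner loop computes wmBOver ============

theorem wmBOver_spec (s t : List Char) (m : Nat) :
    wmBOver s t m = 0 ∨ s.drop (s.length - wmBOver s t m) = t.take (wmBOver s t m) := by
  induction m with
  | zero => exact Or.inl rfl
  | succ k ih =>
      by_cases h : s.drop (s.length - (k + 1)) = t.take (k + 1)
      · right; simp [wmBOver, h]
      · simpa [wmBOver, h] using ih

theorem wmBOver_ge (s t : List Char) (m : Nat) (hm : m ≤ s.length) (ht : t.length ≤ m) :
    wmBOver s t m = wmBOver s t (min s.length t.length) := by
  induction m with
  | zero =>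
      have : t.length = 0 := Nat.le_antisymm ht (Nat.zero_le _)
      simp [this]
  | succ k ih =>
      rcases Nat.lt_or_ge t.length (k + 1) with hlt | hge
      · have hne : ¬ s.drop (s.length - (k + 1)) = t.take (k + 1) := by
          intro h
          have hlen : (s.drop (s.length - (k + 1))).length = (t.take (k + 1)).length := by rw [h]
          simp [List.length_drop, List.length_take] at hlen
          omega
        rw [wmBOver, if_neg hne, ih (by omega) (by omega)]
      · have : min s.length t.length = k + 1 := by omega
        rw [this]

theorem inner_eq_over (s t : List Char) (a : Nat) (ha : a ≤ s.length) :
    wmAInner s t (PySem.List.pyRange (a : Int) (s.length : Int) 1) =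
      (if wmBOver s t (s.length - a) = 0 then none
       else some (s.drop (s.length - wmBOver s t (s.length - a)))) := by
  induction hk : s.length - a generalizing a with
  | zero =>
      have : (s.length : Int) ≤ (a : Int) := by exact_mod_cast (by omega : s.length ≤ a)
      rw [PySem.List.pyRange_one_eq_nil this]
      simp [wmAInner, wmBOver]
  | succ k ih =>
      have halt : a < s.length := by omega
      have hcons : PySem.List.pyRange (a : Int) (s.length : Int) 1
          = (a : Int) :: PySem.List.pyRange ((a : Int) + 1) (s.length : Int) 1 := by
        exact PySem.List.pyRange_one_cons (by exact_mod_cast halt)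
      rw [hcons]
      have hx : PySem.Chars.slice s (some (a : Int)) none = s.drop a := by
        simp [PySem.Chars.slice_eq_listSlice, PySem.List.slice_from_natCast]
      have hsw : PySem.Chars.startswith t (s.drop a) = true ↔ s.drop a <+: t :=
        PySem.Chars.startswith_iff t (s.drop a)
      have hpred : (s.drop a <+: t) ↔ s.drop a = t.take (k + 1) := by
        have hlen : (s.drop a).length = k + 1 := by simp [List.length_drop]; omega
        constructor
        · intro hp
          have := List.prefix_iff_eq_take.mp hp
          rwa [hlen] at this
        · intro he
          rw [he]; exact List.take_prefix _ _
      have hdrop : s.length - (k + 1) = a := by omega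
      by_cases h : s.drop a = t.take (k + 1)
      · have hst : PySem.Chars.startswith t (PySem.Chars.slice s (some (a : Int)) none) = true := by
          rw [hx, hsw]; exact hpred.mpr h
        rw [wmAInner, if_pos hst, hx]
        rw [wmBOver, hdrop, if_pos h]
        simp
        omega
      · have hst : ¬ PySem.Chars.startswith t (PySem.Chars.slice s (some (a : Int)) none) = true := by
          rw [hx, hsw]; intro hp; exact h (hpred.mp hp)
        rw [wmAInner, if_neg hst]
        have hcast : ((a : Int) + 1) = ((a + 1 : Nat) : Int) := by push_cast; ring
        rw [hcast, ih (a + 1) (by omega) (by omega)]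
        rw [wmBOver, hdrop, if_neg h]

theorem inner_eq (s t : List Char) :
    wmAInner s t (PySem.List.pyRange 0 (s.length : Int) 1) =
      (if wmBOver s t (min s.length t.length) = 0 then none
       else some (t.take (wmBOver s t (min s.length t.length)))) := by
  have h0 := inner_eq_over s t 0 (Nat.zero_le _)
  simp only [Nat.sub_zero, Nat.cast_zero] at h0
  have hred : wmBOver s t s.length = wmBOver s t (min s.length t.length) := by
    by_cases hts : t.length ≤ s.length
    · exact wmBOver_ge s t s.length le_rfl hts
    · have hmin : min s.length t.length = s.length := by omega
      rw [hmin]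
  rw [h0, hred]
  rcases wmBOver_spec s t (min s.length t.length) with hz | hk
  · simp [hz]
  · by_cases hz : wmBOver s t (min s.length t.length) = 0
    · simp [hz]
    · simp only [if_neg hz]
      rw [hk]

-- ============ border toolbox ============

theorem bord_zero (v : List Char) (h : v ≠ []) : Bord v 0 := by
  constructor
  · simpa [List.length_pos_iff] using h
  · simp

theorem maxBord_bord (v : List Char) (h : v ≠ []) : Bord v (maxBord v) := by
  rcases Nat.eq_zero_or_pos (maxBord v) with h0 | h0pos
  · rw [h0]; exact bord_zero v h
  · exact Nat.findGreatest_of_ne_zero rfl (by omega)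

theorem bord_le_maxBord (v : List Char) (j : Nat) (hj : Bord v j) : j ≤ maxBord v :=
  Nat.le_findGreatest (by omega) hj

theorem maxBord_le (v : List Char) (j : Nat)
    (hj : ∀ i, Bord v i → i ≤ j) : maxBord v ≤ j := by
  rcases Nat.eq_zero_or_pos (maxBord v) with h0 | h0pos
  · omega
  · exact hj _ (Nat.findGreatest_of_ne_zero rfl (by omega))

-- border of a border is a border
theorem bord_trans (v : List Char) (k j : Nat)
    (hk : Bord v k) (hj : Bord (v.take k) j) : Bord v j := by
  obtain ⟨hk1, hk2⟩ := hk
  obtain ⟨hj1, hj2⟩ := hj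
  rw [List.length_take] at hj1 hj2
  have hjk : j < k := by omega
  have hmin : min k v.length = k := by omega
  rw [hmin] at hj1 hj2
  refine ⟨by omega, ?_⟩
  have h1 : (v.take k).take j = v.take j := by
    rw [List.take_take]; congr 1; omega
  have h2 : (v.take k).drop (k - j) = v.drop (v.length - j) := by
    rw [hk2, List.drop_drop]
    congr 1; omega
  rw [h1, h2] at hj2
  exact hj2

-- a shorter border is a border of a longer border
theorem bord_within (v : List Char) (k j : Nat)
    (hk : Bord v k) (hj : Bord v j) (hjk : j < k) : Bord (v.take k) j := by
  obtain ⟨hk1, hk2⟩ := hk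
  obtain ⟨hj1, hj2⟩ := hj
  have hlen : (v.take k).length = k := by rw [List.length_take]; omega
  refine ⟨by omega, ?_⟩
  rw [hlen]
  have h1 : (v.take k).take j = v.take j := by
    rw [List.take_take]; congr 1; omega
  have h2 : (v.take k).drop (k - j) = v.drop (v.length - j) := by
    rw [hk2, List.drop_drop]
    congr 1; omega
  rw [h1, h2, hj2]

-- extension: borders of v ++ [c] of positive length
theorem bord_succ_iff (v : List Char) (c : Char) (k : Nat) :
    Bord (v ++ [c]) (k + 1) ↔ Bord v k ∧ wmGet v k = c := by
  constructor
  · rintro ⟨h1, h2⟩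
    rw [List.length_append, List.length_singleton] at h1
    have hk : k < v.length := by omega
    rw [List.take_append_of_le_length (by omega),
        show (v ++ [c]).length - (k + 1) = v.length - k by simp,
        List.drop_append_of_le_length (by omega),
        List.take_add_one, List.getElem?_eq_getElem hk] at h2
    simp only [Option.toList_some] at h2
    have hlen : (v.take k).length = (v.drop (v.length - k)).length := by
      simp [List.length_take, List.length_drop]; omega
    obtain ⟨e1, e2⟩ := List.append_inj h2 (by simpa using hlen)
    refine ⟨⟨hk, e1⟩, ?_⟩
    simp only [List.cons_eq_cons] at e2
    rw [wmGet, List.getD_eq_getElem _ _ hk]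
    exact e2.1
  · rintro ⟨⟨hk, hb⟩, hc⟩
    rw [wmGet, List.getD_eq_getElem _ _ hk] at hc
    refine ⟨by simp [List.length_append]; omega, ?_⟩
    rw [List.take_append_of_le_length (by omega),
        show (v ++ [c]).length - (k + 1) = v.length - k by simp,
        List.drop_append_of_le_length (by omega),
        List.take_add_one, List.getElem?_eq_getElem hk]
    simp only [Option.toList_some]
    rw [hb, hc]

-- ============ fallback-loop correctness ============

theorem maxBord_short (v : List Char) (h : v.length ≤ 1) : maxBord v = 0 := by
  unfold maxBord
  have : v.length - 1 = 0 := by omega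
  rw [this, Nat.findGreatest_zero]

-- the fallback loop lands on the largest border of v whose next character is c
theorem fall_spec (u : List Char) (pi : List Nat) (c : Char) (v : List Char)
    (hagree : ∀ j, j < v.length → wmGet u j = wmGet v j)
    (hpi : ∀ k, 1 ≤ k → k ≤ v.length → pi.getD (k - 1) 0 = maxBord (v.take k)) :
    ∀ fuel m, m ≤ fuel → Bord v m →
      (∀ j, Bord v j → wmGet v j = c → j ≤ m) →
      Bord v (wmFall u pi c fuel m) ∧
      (∀ j, Bord v j → wmGet v j = c → j ≤ wmFall u pi c fuel m) ∧
      (¬ c = wmGet v (wmFall u pi c fuel m) → wmFall u pi c fuel m = 0) := by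
  intro fuel
  induction fuel with
  | zero =>
      intro m hm hbm hmax
      have hm0 : m = 0 := by omega
      subst hm0
      exact ⟨hbm, hmax, fun _ => rfl⟩
  | succ fuel ih =>
      intro m hm hbm hmax
      by_cases hcond : 0 < m ∧ ¬ c = wmGet u m
      · rw [wmFall, if_pos hcond]
        obtain ⟨hm0, hne⟩ := hcond
        have hmlt : m < v.length := hbm.1
        have hpim : pi.getD (m - 1) 0 = maxBord (v.take m) := hpi m (by omega) (by omega)
        have hvt : (v.take m).length = m := by rw [List.length_take]; omega
        have hvtne : v.take m ≠ [] := by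
          intro h; rw [h] at hvt; simp at hvt; omega
        have hbm' : Bord (v.take m) (maxBord (v.take m)) := maxBord_bord _ hvtne
        have hlt : maxBord (v.take m) < m := by
          have := hbm'.1; rwa [hvt] at this
        have hb2 : Bord v (maxBord (v.take m)) := bord_trans v m _ hbm hbm'
        have hmax2 : ∀ j, Bord v j → wmGet v j = c → j ≤ maxBord (v.take m) := by
          intro j hj hjc
          have hjm : j ≤ m := hmax j hj hjc
          have hjne : j ≠ m := by
            intro h; subst h
            exact hne (by rw [hagree j hj.1, hjc])
          have : Bord (v.take m) j := bord_within v m j hbm hj (by omega)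
          exact bord_le_maxBord _ _ this
        rw [hpim]
        exact ih _ (by omega) hb2 hmax2
      · rw [wmFall, if_neg hcond]
        refine ⟨hbm, hmax, ?_⟩
        intro hnc
        by_contra hm0
        exact hcond ⟨by omega, by rw [hagree m hbm.1]; exact hnc⟩

-- one wmStep advances the invariant by one character
theorem step_spec (u : List Char) (pi : List Nat) (i : Nat)
    (hi1 : 1 ≤ i) (hi2 : i < u.length)
    (hpi : ∀ j, j < u.length → pi.getD j 0 = if 1 ≤ j ∧ j < i then maxBord (u.take (j + 1)) else 0) :
    wmStep u (pi, maxBord (u.take i)) i =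
      (pi.set i (maxBord (u.take (i + 1))), maxBord (u.take (i + 1))) := by
  set v := u.take i with hv
  set c := wmGet u i with hc
  have hvlen : v.length = i := by rw [hv, List.length_take]; omega
  have hvne : v ≠ [] := by intro h; rw [h] at hvlen; simp at hvlen; omega
  have hagree : ∀ j, j < v.length → wmGet u j = wmGet v j := by
    intro j hj
    rw [hvlen] at hj
    rw [wmGet, wmGet, hv, List.getD_eq_getElem _ _ (by omega : j < u.length),
        List.getD_eq_getElem _ _ (by rw [List.length_take]; omega : j < (u.take i).length)]
    rw [List.getElem_take]
  have hpi' : ∀ k, 1 ≤ k → k ≤ v.length → pi.getD (k - 1) 0 = maxBord (v.take k) := by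
    intro k hk1 hk2
    rw [hvlen] at hk2
    have hvtk : v.take k = u.take k := by
      rw [hv, List.take_take]; congr 1; omega
    rw [hvtk]
    rcases Nat.lt_or_ge (k - 1) 1 with h1 | h1
    · have hk : k = 1 := by omega
      subst hk
      rw [hpi 0 (by omega)]
      rw [if_neg (by omega)]
      rw [maxBord_short]
      rw [List.length_take]; omega
    · rw [hpi (k - 1) (by omega)]
      rw [if_pos ⟨by omega, by omega⟩]
      congr 2
      omega
  have hfall := fall_spec u pi c v hagree hpi' (maxBord v) (maxBord v) le_rfl
      (maxBord_bord v hvne) (fun j hj _ => bord_le_maxBord v j hj)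
  set k1 := wmFall u pi c (maxBord v) (maxBord v) with hk1def
  obtain ⟨hbk1, hmaxk1, hexit⟩ := hfall
  have hk1lt : k1 < v.length := hbk1.1
  have hagree1 : wmGet u k1 = wmGet v k1 := hagree k1 hk1lt
  have hsucc : u.take (i + 1) = v ++ [c] := by
    have hgi : wmGet u i = u[i] := by rw [wmGet, List.getD_eq_getElem _ _ hi2]
    rw [hv, hc, hgi, List.take_add_one, List.getElem?_eq_getElem hi2]
    rfl
  have hk2 : (if c = wmGet u k1 then k1 + 1 else k1) = maxBord (u.take (i + 1)) := by
    rw [hsucc]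
    by_cases hcc : c = wmGet u k1
    · rw [if_pos hcc]
      have hbs : Bord (v ++ [c]) (k1 + 1) :=
        (bord_succ_iff v c k1).mpr ⟨hbk1, by rw [← hagree1, ← hcc]⟩
      refine Nat.le_antisymm (bord_le_maxBord _ _ hbs) (maxBord_le _ _ ?_)
      intro j hj
      cases j with
      | zero => omega
      | succ j' =>
          obtain ⟨hb', hc'⟩ := (bord_succ_iff v c j').mp hj
          have := hmaxk1 j' hb' hc'
          omega
    · rw [if_neg hcc]
      have hk10 : k1 = 0 := hexit (by rw [← hagree1]; exact hcc)
      rw [hk10]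
      symm
      apply Nat.le_antisymm _ (Nat.zero_le _)
      apply maxBord_le
      intro j hj
      cases j with
      | zero => omega
      | succ j' =>
          obtain ⟨hb', hc'⟩ := (bord_succ_iff v c j').mp hj
          have hj0 : j' = 0 := by have := hmaxk1 j' hb' hc'; omega
          subst hj0
          exfalso
          apply hcc
          rw [hagree1, hk10, ← hc']
  show (pi.set i _, _) = _
  rw [hk1def] at hk2
  rw [hk2]

-- wmStep never changes the length of pi
theorem fold_fst_length (u : List Char) (L : List Nat) (st : List Nat × Nat) :
    ((L.foldl (wmStep u) st).1).length = st.1.length := by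
  induction L generalizing st with
  | nil => rfl
  | cons a L ihL =>
      rw [List.foldl_cons, ihL]
      simp [wmStep]

-- the fold maintains: k = maxBord of the processed prefix, pi holds maxBord of all shorter prefixes
theorem fold_inv (u : List Char) (n : Nat) (hn : n ≤ u.length - 1) :
    ((List.range' 1 n).foldl (wmStep u) (List.replicate u.length 0, 0)).2
        = maxBord (u.take (n + 1)) ∧
    ∀ j, j < u.length →
      ((List.range' 1 n).foldl (wmStep u) (List.replicate u.length 0, 0)).1.getD j 0
        = if 1 ≤ j ∧ j < n + 1 then maxBord (u.take (j + 1)) else 0 := by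
  induction n with
  | zero =>
      constructor
      · simp [maxBord_short (u.take 1) (by rw [List.length_take]; omega)]
      · intro j hj
        rw [if_neg (by omega)]
        simp
  | succ n ih =>
      obtain ⟨ih1, ih2⟩ := ih (by omega)
      rw [List.range'_1_concat, List.foldl_append, List.foldl_cons, List.foldl_nil]
      set st := (List.range' 1 n).foldl (wmStep u) (List.replicate u.length 0, 0) with hst
      have hlen : st.1.length = u.length := by
        rw [hst, fold_fst_length]
        simp
      have hpair : st = (st.1, maxBord (u.take (n + 1))) := by
        rw [← ih1]
      rw [hpair, show 1 + n = n + 1 by omega]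
      rw [step_spec u st.1 (n + 1) (by omega) (by omega) (fun j hj => ih2 j hj)]
      refine ⟨rfl, ?_⟩
      intro j hj
      have hjl : j < st.1.length := by omega
      show (st.1.set (n + 1) (maxBord (u.take (n + 1 + 1)))).getD j 0 = _
      rcases eq_or_ne j (n + 1) with hje | hjn
      · subst hje
        rw [List.getD_eq_getElem _ _ (by rwa [List.length_set]),
            List.getElem_set_self]
        rw [if_pos ⟨by omega, by omega⟩]
      · rw [List.getD_eq_getElem _ _ (by rwa [List.length_set]),
            List.getElem_set_ne (by omega),
            ← List.getD_eq_getElem st.1 0 hjl, ih2 j hj]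
        rcases Nat.lt_or_ge j (n + 1) with h | h
        · by_cases h1 : 1 ≤ j
          · rw [if_pos ⟨h1, by omega⟩, if_pos ⟨h1, by omega⟩]
          · rw [if_neg (by omega), if_neg (by omega)]
        · rw [if_neg (by omega), if_neg (by omega)]

-- Source B's per-pair loop body computes the longest proper border
theorem wmPi_eq (u : List Char) (hu : u ≠ []) : wmPi u = maxBord u := by
  have hlen : 1 ≤ u.length := by
    cases u with
    | nil => exact absurd rfl hu
    | cons a l => simp
  unfold wmPi
  rw [(fold_inv u (u.length - 1) le_rfl).1]
  congr 1
  rw [show u.length - 1 + 1 = u.length by omega, List.take_length]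

-- ============ the separator reduces borders of t ++ '\x00' :: s to overlaps ============

theorem bord_sep_iff (s t : List Char) (hs : '\x00' ∉ s) (ht : '\x00' ∉ t) (k : Nat) :
    Bord (t ++ '\x00' :: s) k ↔
      (k ≤ min s.length t.length ∧ s.drop (s.length - k) = t.take k) := by
  have hulen : (t ++ '\x00' :: s).length = t.length + (s.length + 1) := by simp
  constructor
  · rintro ⟨hk, he⟩
    rw [hulen] at hk
    have hks : k ≤ s.length := by
      by_contra hgt
      have hp : k - s.length - 1 < k := by omega
      have hplt : k - s.length - 1 < t.length := by omega
      have hp1 : k - s.length - 1 < (List.take k (t ++ '\x00' :: s)).length := by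
        rw [List.length_take]; omega
      have hchain := List.getElem_of_eq he hp1
      rw [List.getElem_take, List.getElem_append_left hplt, List.getElem_drop] at hchain
      rw [getElem_congr_idx (show (t ++ '\x00' :: s).length - k + (k - s.length - 1)
            = t.length by omega)] at hchain
      rw [List.getElem_append_right le_rfl] at hchain
      simp only [Nat.sub_self, List.getElem_cons_zero] at hchain
      exact ht (hchain ▸ List.getElem_mem hplt)
    have hkt : k ≤ t.length := by
      by_contra hgt
      have hq1 : t.length < (List.take k (t ++ '\x00' :: s)).length := by
        rw [List.length_take]; omega
      have hchain := List.getElem_of_eq he hq1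
      have hilt : t.length + (s.length + 1) - k + t.length - (t.length + 1) < s.length := by omega
      rw [List.getElem_take, List.getElem_append_right le_rfl] at hchain
      simp only [Nat.sub_self, List.getElem_cons_zero] at hchain
      rw [List.getElem_drop] at hchain
      rw [getElem_congr_idx (show (t ++ '\x00' :: s).length - k + t.length
            = t.length + ((t.length + (s.length + 1) - k + t.length) - t.length) by omega)] at hchain
      rw [List.getElem_append_right (by omega)] at hchain
      rw [getElem_congr_idx (show t.length + (t.length + (s.length + 1) - k + t.length - t.length)
            - t.length = (t.length + (s.length + 1) - k + t.length - (t.length + 1)) + 1 by omega)] at hchain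
      rw [List.getElem_cons_succ] at hchain
      exact hs (hchain.symm ▸ List.getElem_mem hilt)
    refine ⟨by omega, ?_⟩
    rw [List.take_append_of_le_length hkt] at he
    rw [show (t ++ '\x00' :: s).length - k = t.length + ((s.length - k) + 1) by
          rw [hulen]; omega] at he
    rw [List.drop_append, List.drop_eq_nil_of_le (by omega), List.nil_append,
        show t.length + (s.length - k + 1) - t.length = (s.length - k) + 1 by omega,
        List.drop_succ_cons] at he
    exact he.symm
  · rintro ⟨hk, he⟩
    refine ⟨by omega, ?_⟩
    rw [List.take_append_of_le_length (by omega)]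
    rw [show (t ++ '\x00' :: s).length - k = t.length + ((s.length - k) + 1) by
          rw [hulen]; omega]
    rw [List.drop_append, List.drop_eq_nil_of_le (by omega), List.nil_append,
        show t.length + (s.length - k + 1) - t.length = (s.length - k) + 1 by omega,
        List.drop_succ_cons]
    exact he.symm

theorem wmBOver_eq_findGreatest (s t : List Char) (m : Nat) :
    wmBOver s t m
      = Nat.findGreatest (fun k => s.drop (s.length - k) = t.take k) m := by
  induction m with
  | zero => rfl
  | succ k ih =>
      rw [wmBOver, Nat.findGreatest_succ]
      by_cases h : s.drop (s.length - (k + 1)) = t.take (k + 1)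
      · rw [if_pos h, if_pos h]
      · rw [if_neg h, if_neg h, ih]

theorem maxBord_sep (s t : List Char) (hs : '\x00' ∉ s) (ht : '\x00' ∉ t) :
    maxBord (t ++ '\x00' :: s) = wmBOver s t (min s.length t.length) := by
  rw [wmBOver_eq_findGreatest]
  apply Nat.le_antisymm
  · apply maxBord_le
    intro i hi
    obtain ⟨h1, h2⟩ := (bord_sep_iff s t hs ht i).mp hi
    exact Nat.le_findGreatest h1 h2
  · rcases Nat.eq_zero_or_pos
        (Nat.findGreatest (fun k => s.drop (s.length - k) = t.take k)
          (min s.length t.length)) with h0 | hpos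
    · omega
    · have hQ := Nat.findGreatest_of_ne_zero
        (rfl : Nat.findGreatest (fun k => s.drop (s.length - k) = t.take k)
          (min s.length t.length) = _) (by omega)
      have hle := Nat.findGreatest_le (n := min s.length t.length)
        (P := fun k => s.drop (s.length - k) = t.take k)
      exact bord_le_maxBord _ _ ((bord_sep_iff s t hs ht _).mpr ⟨hle, hQ⟩)

-- B's per-pair value is the longest suffix-prefix overlap
theorem wmPair_eq (s t : List Char) (hs : '\x00' ∉ s) (ht : '\x00' ∉ t) :
    wmPair s t = wmBOver s t (min s.length t.length) := by
  rw [wmPair, wmPi_eq _ (by simp), maxBord_sep s t hs ht]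

-- ============ the outer loops agree ============

theorem loop_eq (ws : List (List Char)) (hsep : ∀ v ∈ ws, '\x00' ∉ v) (a : Nat) (r : List Char) :
    wmALoop ws r (PySem.List.pyRange (a : Int) ((ws.length : Int) - 1) 1) =
      (wmBGo ((ws.drop a).zip (ws.drop a).tail)).map (fun parts => r ++ parts.flatten) := by
  induction hk : ws.length - 1 - a generalizing a r with
  | zero =>
      have hnil : PySem.List.pyRange (a : Int) ((ws.length : Int) - 1) 1 = [] :=
        PySem.List.pyRange_one_eq_nil (by omega)
      rw [hnil]
      have : ((ws.drop a).zip (ws.drop a).tail) = [] := by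
        rcases h : ws.drop a with _ | ⟨x, l⟩
        · rfl
        · have hlen : (ws.drop a).length ≤ 1 := by simp [List.length_drop]; omega
          rw [h] at hlen
          simp at hlen
          subst hlen
          rfl
      rw [this]
      simp [wmALoop, wmBGo]
  | succ k ih =>
      have ha1 : a + 1 < ws.length := by omega
      have hcons : PySem.List.pyRange (a : Int) ((ws.length : Int) - 1) 1
          = (a : Int) :: PySem.List.pyRange ((a : Int) + 1) ((ws.length : Int) - 1) 1 :=
        PySem.List.pyRange_one_cons (by omega)
      rw [hcons]
      have hsg : PySem.List.pyGetD ws (a : Int) [] = ws[a]'(by omega) := by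
        rw [PySem.List.pyGetD_eq_getElem ws [] (by positivity) (by omega)]
        simp
      have htg : PySem.List.pyGetD ws ((a : Int) + 1) [] = ws[a + 1]'ha1 := by
        rw [PySem.List.pyGetD_eq_getElem ws [] (by positivity) (by omega)]
        simp
      have hdropa : ws.drop a = ws[a]'(by omega) :: ws.drop (a + 1) := List.drop_eq_getElem_cons (by omega)
      have hdropa1 : ws.drop (a + 1) = ws[a + 1]'ha1 :: ws.drop (a + 2) := List.drop_eq_getElem_cons ha1
      rw [wmALoop]
      simp only [hsg, htg]
      rw [inner_eq]
      have hzip : ((ws.drop a).zip (ws.drop a).tail)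
          = (ws[a]'(by omega), ws[a + 1]'ha1) :: ((ws.drop (a + 1)).zip (ws.drop (a + 1)).tail) := by
        rw [hdropa, List.tail_cons, hdropa1, List.zip_cons_cons, List.tail_cons]
      rw [hzip, wmBGo]
      rw [wmPair_eq _ _ (hsep _ (List.getElem_mem (by omega))) (hsep _ (List.getElem_mem ha1))]
      by_cases hz : wmBOver (ws[a]'(by omega)) (ws[a + 1]'ha1) (min (ws[a]'(by omega)).length (ws[a + 1]'ha1).length) = 0
      · simp [hz]
      · simp only [hz, if_false]
        have hcast : ((a : Int) + 1) = ((a + 1 : Nat) : Int) := by push_cast; ring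
        rw [hcast, ih (a + 1) _ (by omega)]
        rcases hgo : wmBGo ((ws.drop (a + 1)).zip (ws.drop (a + 1)).tail) with _ | parts
        · simp
        · simp [List.append_assoc]

-- ===== VERDICT (by name: the statement is the Claim_ definition above) =====
theorem word_mesh_spec : Claim_equal_word_mesh := by
  intro w hdom
  have hsep : ∀ v ∈ w.map String.toList, '\x00' ∉ v := by
    intro v hv hc
    rw [List.mem_map] at hv
    obtain ⟨x, hx, rfl⟩ := hv
    have hds : pvDomStr x = true := List.all_eq_true.mp hdom x hx
    have := List.all_eq_true.mp hds _ hc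
    simp [pvDomChar] at this
  unfold Spec_word_mesh word_mesh word_mesh_alt
  have h := loop_eq (w.map String.toList) hsep 0 []
  simp only [Nat.cast_zero, List.drop_zero, List.length_map] at h
  rw [h]
  rcases hgo : wmBGo (((w.map String.toList)).zip ((w.map String.toList)).tail) with _ | parts
  · simp [hgo]
  · simp [hgo]
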